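-- pv_equiv track=rewrite | github.com/AdamZhouSE/pythonHomework | Code/CodeRecords/2243/60621/247425.py | solution
-- ===== SOURCE A (Python) =====
-- def solution(p,q):
--     i = 0
--     count = 0
--     while True:
--         i+=1
--         count+=q
--         if(count%p==0):
--             if((count//p)%2==1):
--                 if(i%2==0):
--                     return 2
--                 else:
--                     return 1
--             else:
--                 if(i%2==1):
--                     return 0
-- ===== SOURCE B (Python) =====
-- def solution(p, q):
--     # gcd via Euclid on absolute values; p != 0 so g > 0
--     a, b = abs(p), abs(q)
--     while b:
--         a, b = b, a % b
--     pp = abs(p) // a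
--     qq = abs(q) // a
--     if qq % 2 == 1:
--         return 2 if pp % 2 == 0 else 1
--     return 0
-- ===== Notes on version B (the rewrite author's own statement) =====
-- stated objective: faster
-- what changed: A scans multiples i*q one by one until p divides i*q; B computes the gcd by Euclid's algorithm, reduces p and q to coprime parts p'=|p|/g and q'=|q|/g, and answers by an O(1) parity case analysis on p' and q'.
import Mathlib
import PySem

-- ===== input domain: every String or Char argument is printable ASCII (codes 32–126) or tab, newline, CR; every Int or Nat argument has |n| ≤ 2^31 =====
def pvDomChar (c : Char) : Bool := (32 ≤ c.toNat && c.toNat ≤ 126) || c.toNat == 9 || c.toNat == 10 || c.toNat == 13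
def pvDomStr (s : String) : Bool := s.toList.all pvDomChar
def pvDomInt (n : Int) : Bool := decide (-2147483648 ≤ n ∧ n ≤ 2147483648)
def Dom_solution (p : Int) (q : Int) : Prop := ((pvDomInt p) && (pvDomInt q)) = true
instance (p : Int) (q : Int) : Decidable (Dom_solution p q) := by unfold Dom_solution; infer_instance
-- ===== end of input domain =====

-- B replaces A's linear scan of multiples of q by Euclid's gcd plus an O(1) parity
-- case analysis on the coprime parts |p|/g and |q|/g (objective: faster).

-- ===== PORT A =====
-- A's 'while True' loop, step for step; fuel |p| bounds the steps the loop runs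
-- (under Pre_ it returns at the first i with p | i*q, and that i is ≤ |p|);
-- the fuel-0 default 0 is never reached under Pre_.
def solutionLoop (p : Int) (q : Int) : Nat → Int → Int → Int
  | 0, _, _ => 0
  | fuel + 1, i, count =>
    let i' := i + 1
    let count' := count + q
    if PySem.Int.mod count' p = 0 then
      if PySem.Int.mod (PySem.Int.floordiv count' p) 2 = 1 then
        if PySem.Int.mod i' 2 = 0 then 2 else 1
      else
        if PySem.Int.mod i' 2 = 1 then 0
        else solutionLoop p q fuel i' count'
    else solutionLoop p q fuel i' count'

def solution (p : Int) (q : Int) : Int := solutionLoop p q p.natAbs 0 0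

-- ===== PORT B =====
-- termination of Euclid's loop: the Python remainder's magnitude drops below |b|
theorem pyMod_natAbs_lt (a b : Int) (hb : b ≠ 0) : (PySem.Int.mod a b).natAbs < b.natAbs := by
  rcases lt_or_gt_of_ne hb with h | h
  · have h1 := PySem.Int.mod_neg_bounds a h
    omega
  · have h1 := PySem.Int.mod_nonneg a h
    have h2 := PySem.Int.mod_lt a h
    omega

-- Source B's 'while b: a, b = b, a % b'
def euclid (a : Int) (b : Int) : Int :=
  if _hb : b = 0 then a
  else euclid b (PySem.Int.mod a b)
termination_by b.natAbs
decreasing_by exact pyMod_natAbs_lt a b _hb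

def solution_alt (p : Int) (q : Int) : Int :=
  let g := euclid |p| |q|
  let pp := PySem.Int.floordiv |p| g
  let qq := PySem.Int.floordiv |q| g
  if PySem.Int.mod qq 2 = 1 then
    if PySem.Int.mod pp 2 = 0 then 2 else 1
  else 0

-- ===== PRECONDITION & SPEC =====
-- Pre_ excludes exactly p = 0, where Python A raises ZeroDivisionError on 'count % p'.
def Pre_solution (p : Int) (q : Int) : Prop := p ≠ 0
instance (p : Int) (q : Int) : Decidable (Pre_solution p q) := by unfold Pre_solution; infer_instance
def pvWitness_solution : Int × Int := (4, 6)

def Spec_solution (p : Int) (q : Int) (out : Int) : Prop := out = solution_alt p q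
instance (p : Int) (q : Int) (out : Int) : Decidable (Spec_solution p q out) := by unfold Spec_solution; infer_instance

-- ===== CLAIM (what is proved, stated in full; the proofs are below) =====
def Claim_equal_solution : Prop := ∀ (p : Int) (q : Int), Dom_solution p q → Pre_solution p q → Spec_solution p q (solution p q)

-- ===== LEMMAS AND PROOFS =====

-- the common closed-form answer, over the coprime parts p' = |p|/g, q' = |q|/g
def answerF (p' : Nat) (q' : Nat) : Int :=
  if q' % 2 = 1 then (if p' % 2 = 0 then 2 else 1) else 0

theorem mod_natCast_two (m : Nat) : PySem.Int.mod (m : Int) 2 = ((m % 2 : Nat) : Int) := by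
  exact_mod_cast PySem.Int.mod_natCast m 2

theorem euclid_natCast (m n : Nat) : euclid (m : Int) (n : Int) = (Nat.gcd m n : Int) := by
  induction n using Nat.strong_induction_on generalizing m with
  | _ n ih =>
    rw [euclid]
    by_cases h : (n : Int) = 0
    · have hn : n = 0 := by exact_mod_cast h
      subst hn; simp
    · have hn : n ≠ 0 := by exact_mod_cast h
      rw [dif_neg h, PySem.Int.mod_natCast, ih (m % n) (Nat.mod_lt m (Nat.pos_of_ne_zero hn))]
      rw [Nat.gcd_comm n (m % n), ← Nat.gcd_rec n m, Nat.gcd_comm]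

theorem dvd_iff_coprime_part (p q : Int) (hp : p ≠ 0) (k : Nat) :
    p ∣ ((k : Int) * q) ↔ (p.natAbs / Int.gcd p q) ∣ k := by
  have hg : 0 < Int.gcd p q := Int.gcd_pos_of_ne_zero_left q hp
  have hgP : Int.gcd p q ∣ p.natAbs := Int.gcd_dvd_natAbs_left p q
  have hgQ : Int.gcd p q ∣ q.natAbs := Int.gcd_dvd_natAbs_right p q
  have cop : Nat.Coprime (p.natAbs / Int.gcd p q) (q.natAbs / Int.gcd p q) :=
    Nat.coprime_div_gcd_div_gcd hg
  set g := Int.gcd p q with hgdef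
  set P := p.natAbs
  set Q := q.natAbs
  have hP : (P / g) * g = P := Nat.div_mul_cancel hgP
  have hQ : (Q / g) * g = Q := Nat.div_mul_cancel hgQ
  have h1 : p ∣ ((k : Int) * q) ↔ P ∣ (k * Q) := by
    rw [← Int.natAbs_dvd_natAbs, Int.natAbs_mul, Int.natAbs_natCast]
  rw [h1]
  constructor
  · intro h
    have h2 : (P / g) * g ∣ (k * (Q / g)) * g := by
      rw [hP]
      calc P ∣ k * Q := h
        _ = (k * (Q / g)) * g := by rw [mul_assoc, hQ]
    have h3 : (P / g) ∣ k * (Q / g) := (Nat.mul_dvd_mul_iff_right hg).mp h2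
    exact cop.dvd_of_dvd_mul_right h3
  · intro h
    have h2 : (P / g) * g ∣ (k * (Q / g)) * g :=
      Nat.mul_dvd_mul_right (Dvd.dvd.mul_right h (Q / g)) g
    rw [hP, mul_assoc, hQ] at h2
    exact h2

theorem quot_natAbs (p q : Int) (hp : p ≠ 0)
    (d : Int) (heq : d * p = ((p.natAbs / Int.gcd p q : Nat) : Int) * q) :
    d.natAbs = q.natAbs / Int.gcd p q := by
  have hg : 0 < Int.gcd p q := Int.gcd_pos_of_ne_zero_left q hp
  have hgP : Int.gcd p q ∣ p.natAbs := Int.gcd_dvd_natAbs_left p q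
  have hgQ : Int.gcd p q ∣ q.natAbs := Int.gcd_dvd_natAbs_right p q
  set g := Int.gcd p q
  set P := p.natAbs with hPdef
  set Q := q.natAbs
  have hP : (P / g) * g = P := Nat.div_mul_cancel hgP
  have hQ : (Q / g) * g = Q := Nat.div_mul_cancel hgQ
  have hp' : 0 < P / g := Nat.div_pos (Nat.le_of_dvd (Int.natAbs_pos.mpr hp) hgP) hg
  have hnat : d.natAbs * P = (P / g) * Q := by
    have := congrArg Int.natAbs heq
    simpa [Int.natAbs_mul] using this
  have h2 : d.natAbs * ((P / g) * g) = (P / g) * ((Q / g) * g) := by rw [hP, hQ]; exact hnat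
  have h3 : (d.natAbs * (P / g)) * g = ((P / g) * (Q / g)) * g := by ring_nf; ring_nf at h2; exact h2
  have h4 : d.natAbs * (P / g) = (P / g) * (Q / g) := Nat.eq_of_mul_eq_mul_right hg h3
  have h5 : (P / g) * d.natAbs = (P / g) * (Q / g) := by rw [mul_comm] at h4; exact h4
  exact Nat.eq_of_mul_eq_mul_left hp' h5

theorem pymod_two_eq_one (d : Int) : PySem.Int.mod d 2 = 1 ↔ d.natAbs % 2 = 1 := by
  have h1 := PySem.Int.mod_nonneg d (show (0:Int) < 2 by norm_num)
  have h2 := PySem.Int.mod_lt d (show (0:Int) < 2 by norm_num)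
  have h0 := PySem.Int.mod_eq_zero_iff_dvd d 2
  have hdvd : (2:Int) ∣ d ↔ 2 ∣ d.natAbs := by
    rw [← Int.natAbs_dvd_natAbs]; norm_num
  omega

theorem coprime_parts (p q : Int) (hp : p ≠ 0) :
    Nat.Coprime (p.natAbs / Int.gcd p q) (q.natAbs / Int.gcd p q) :=
  Nat.coprime_div_gcd_div_gcd (Int.gcd_pos_of_ne_zero_left q hp)

theorem loop_eval (p q : Int) (hp : p ≠ 0) :
    ∀ (fuel i : Nat), i < p.natAbs / Int.gcd p q → p.natAbs / Int.gcd p q ≤ i + fuel →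
      solutionLoop p q fuel (i : Int) ((i : Int) * q) =
        answerF (p.natAbs / Int.gcd p q) (q.natAbs / Int.gcd p q) := by
  intro fuel
  induction fuel with
  | zero => intro i h1 h2; omega
  | succ n ih =>
    intro i h1 h2
    rw [solutionLoop]
    have hi' : (i : Int) + 1 = ((i+1 : Nat) : Int) := by push_cast; ring
    have hc' : (i : Int) * q + q = ((i+1 : Nat) : Int) * q := by push_cast; ring
    simp only [hi', hc']
    by_cases hend : i + 1 = p.natAbs / Int.gcd p q
    · have hdvd : p ∣ ((i+1 : Nat) : Int) * q :=
        (dvd_iff_coprime_part p q hp (i+1)).mpr (by rw [hend])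
      have hmod0 : PySem.Int.mod (((i+1:Nat):Int) * q) p = 0 :=
        (PySem.Int.mod_eq_zero_iff_dvd _ _).mpr hdvd
      rw [if_pos hmod0]
      set d := PySem.Int.floordiv (((i+1:Nat):Int) * q) p with hd
      have heq : d * p = ((i+1:Nat):Int) * q := by
        have h := PySem.Int.floordiv_mul_add_mod (((i+1:Nat):Int) * q) p
        rw [← hd, hmod0] at h; omega
      have hdq : d.natAbs = q.natAbs / Int.gcd p q := by
        apply quot_natAbs p q hp d
        rw [heq, hend]
      have hpar : PySem.Int.mod d 2 = 1 ↔ (q.natAbs / Int.gcd p q) % 2 = 1 := by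
        rw [pymod_two_eq_one, hdq]
      have himod : PySem.Int.mod (((i+1:Nat):Int)) 2 = (((i+1) % 2 : Nat) : Int) :=
        PySem.Int.mod_natCast (i+1) 2
      unfold answerF
      by_cases hqq : (q.natAbs / Int.gcd p q) % 2 = 1
      · rw [if_pos (hpar.mpr hqq), if_pos hqq, himod, hend]
        by_cases hpp : (p.natAbs / Int.gcd p q) % 2 = 0
        · rw [if_pos hpp, if_pos (by exact_mod_cast congrArg (Nat.cast : Nat → Int) hpp)]
        · rw [if_neg hpp, if_neg (by
            intro hcon
            apply hpp
            exact_mod_cast hcon)]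
      · -- q' even, so p' odd by coprimality
        have cop := coprime_parts p q hp
        have hpodd : (p.natAbs / Int.gcd p q) % 2 = 1 := by
          have h2q : 2 ∣ q.natAbs / Int.gcd p q := by omega
          by_contra hno
          have h2p : 2 ∣ p.natAbs / Int.gcd p q := by omega
          have hd2 := Nat.dvd_gcd h2p h2q
          rw [Nat.Coprime] at cop
          rw [cop] at hd2
          omega
        rw [if_neg (fun hcon => hqq (hpar.mp hcon)), if_neg hqq, himod, hend]
        rw [if_pos (by exact_mod_cast congrArg (Nat.cast : Nat → Int) hpodd)]
    · -- i+1 < p' : no divisibility yet, the loop recurses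
      have hnd : ¬ p ∣ ((i+1 : Nat) : Int) * q := by
        rw [dvd_iff_coprime_part p q hp (i+1)]
        intro hdvd
        have := Nat.le_of_dvd (by omega) hdvd
        omega
      have hmodne : PySem.Int.mod (((i+1:Nat):Int) * q) p ≠ 0 := fun hc =>
        hnd ((PySem.Int.mod_eq_zero_iff_dvd _ _).mp hc)
      rw [if_neg hmodne]
      exact ih (i+1) (by omega) (by omega)

theorem alt_eval (p q : Int) :
    solution_alt p q = answerF (p.natAbs / Int.gcd p q) (q.natAbs / Int.gcd p q) := by
  unfold solution_alt answerF
  rw [Int.abs_eq_natAbs p, Int.abs_eq_natAbs q, euclid_natCast]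
  simp only [PySem.Int.floordiv_natCast, mod_natCast_two]
  have hgcd : Nat.gcd p.natAbs q.natAbs = Int.gcd p q := rfl
  rw [hgcd]
  split_ifs <;> first | rfl | (exfalso; omega)

-- ===== VERDICT (by name: the statement is the Claim_ definition above) =====
theorem solution_spec : Claim_equal_solution := by
  intro p q _ hp
  unfold Spec_solution
  have hg : 0 < Int.gcd p q := Int.gcd_pos_of_ne_zero_left q hp
  have hP : 0 < p.natAbs := Int.natAbs_pos.mpr hp
  have hp' : 0 < p.natAbs / Int.gcd p q :=
    Nat.div_pos (Nat.le_of_dvd hP (Int.gcd_dvd_natAbs_left p q)) hg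
  have hle : p.natAbs / Int.gcd p q ≤ p.natAbs := Nat.div_le_self _ _
  have h0 : solution p q = solutionLoop p q p.natAbs ((0:Nat):Int) (((0:Nat):Int) * q) := by
    unfold solution; norm_num
  rw [h0, loop_eval p q hp p.natAbs 0 hp' (by omega), alt_eval p q]
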